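-- pv_equiv track=rewrite | github.com/dhairyaahuja11-crypto/IAS_Calibration | ui/calibration/pre_treatment.py | _format_algorithm_step
-- ===== SOURCE A (Python) =====
-- def _format_algorithm_step(algorithm_name, params):
--     """Create a readable preprocessing label including active parameters."""
--     if not params:
--         return algorithm_name
--
--     ordered_keys = ["window_size", "window_length", "polyorder", "deriv"]
--     parts = []
--     for key in ordered_keys:
--         if key in params:
--             parts.append(f"{key}={params[key]}")
--     for key, value in params.items():
--         if key not in ordered_keys:
--             parts.append(f"{key}={value}")
--
--     return f"{algorithm_name} ({', '.join(parts)})" if parts else algorithm_name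
-- ===== SOURCE B (Python) =====
-- def _format_algorithm_step(algorithm_name, params):
--     """Create a readable preprocessing label including active parameters."""
--     if not params:
--         return algorithm_name
--
--     ordered_keys = ["window_size", "window_length", "polyorder", "deriv"]
--     # single-pass bucket sort: each param goes straight to its rank's bucket
--     buckets = [[], [], [], [], []]
--     for key, value in params.items():
--         i = ordered_keys.index(key) if key in ordered_keys else len(ordered_keys)
--         buckets[i].append(f"{key}={value}")
--     parts = [p for b in buckets for p in b]
--     return f"{algorithm_name} ({', '.join(parts)})"
-- ===== Notes on version B (the rewrite author's own statement) =====
-- stated objective: alternative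
-- what changed: Replaces A's two loops (a scan of the four priority keys with a membership+lookup each, then a second pass over params filtering out priority keys) by a single bucket-sort pass over params that drops each formatted entry into the bucket of its rank and concatenates the five buckets.
import Mathlib
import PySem

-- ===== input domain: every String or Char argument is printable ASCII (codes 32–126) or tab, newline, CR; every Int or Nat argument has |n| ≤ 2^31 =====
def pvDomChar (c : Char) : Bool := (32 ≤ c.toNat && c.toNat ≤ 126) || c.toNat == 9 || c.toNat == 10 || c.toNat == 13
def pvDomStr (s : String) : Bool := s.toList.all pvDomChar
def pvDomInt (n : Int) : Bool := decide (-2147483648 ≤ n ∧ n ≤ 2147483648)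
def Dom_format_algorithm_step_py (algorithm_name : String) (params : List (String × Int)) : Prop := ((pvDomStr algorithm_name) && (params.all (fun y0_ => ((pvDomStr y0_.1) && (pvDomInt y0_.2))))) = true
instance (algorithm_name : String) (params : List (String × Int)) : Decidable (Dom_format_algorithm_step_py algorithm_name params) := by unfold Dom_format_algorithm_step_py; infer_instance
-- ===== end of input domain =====

-- B replaces A's two loops by a single bucket-sort pass over params; objective: alternative decomposition, same cost.

-- the f-string f"{key}={value}" used by both Pythons
def pvFmt (k : String) (v : Int) : String := k ++ "=" ++ PySem.Int.toStr v

-- ===== PORT A =====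
def format_algorithm_step_py (algorithm_name : String) (params : List (String × Int)) : String :=
  if params = [] then algorithm_name
  else
    let ordered : List String := ["window_size", "window_length", "polyorder", "deriv"]
    -- 'if key in params: parts.append(f"{key}={params[key]}")' — membership + lookup on the dict,
    -- ported together as one first-match lookup (on a dict they coincide)
    let parts := ordered.foldl (fun acc key =>
      match (PySem.Dict.mk params).get? key with
      | some v => acc ++ [pvFmt key v]
      | none => acc) []
    let parts2 := params.foldl (fun acc kv =>
      if ordered.contains kv.1 then acc else acc ++ [pvFmt kv.1 kv.2]) parts
    if parts2 = [] then algorithm_name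
    else algorithm_name ++ " (" ++ PySem.Str.join ", " parts2 ++ ")"

-- ===== PORT B =====
-- the body of B's bucket loop: i = ordered_keys.index(key) if key in ordered_keys else len(ordered_keys); buckets[i].append(...)
def pvStep (bs : List (List String)) (kv : String × Int) : List (List String) :=
  let ordered : List String := ["window_size", "window_length", "polyorder", "deriv"]
  let i := match PySem.List.index? ordered kv.1 with
           | some i => i
           | none => ordered.length
  bs.set i ((bs.getD i []) ++ [pvFmt kv.1 kv.2])

def format_algorithm_step_py_alt (algorithm_name : String) (params : List (String × Int)) : String :=
  if params = [] then algorithm_name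
  else
    let buckets := params.foldl pvStep [[], [], [], [], []]
    let parts := buckets.flatten
    algorithm_name ++ " (" ++ PySem.Str.join ", " parts ++ ")"

-- ===== PRECONDITION & SPEC =====
-- Pre_ excludes association lists with duplicate keys, which no Python dict can contain: only the
-- assoc-list encoding reaches them, and the two ports' behaviour there is an artefact of that encoding.
def Pre_format_algorithm_step_py (_algorithm_name : String) (params : List (String × Int)) : Prop :=
  (params.map Prod.fst).Nodup
instance (algorithm_name : String) (params : List (String × Int)) : Decidable (Pre_format_algorithm_step_py algorithm_name params) := by unfold Pre_format_algorithm_step_py; infer_instance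
def pvWitness_format_algorithm_step_py : String × (List (String × Int)) :=
  ("savgol", [("polyorder", 2), ("x", 1)])

def Spec_format_algorithm_step_py (algorithm_name : String) (params : List (String × Int)) (out : String) : Prop := out = format_algorithm_step_py_alt algorithm_name params
instance (algorithm_name : String) (params : List (String × Int)) (out : String) : Decidable (Spec_format_algorithm_step_py algorithm_name params out) := by unfold Spec_format_algorithm_step_py; infer_instance

-- ===== CLAIM (what is proved, stated in full; the proofs are below) =====
def Claim_equal_format_algorithm_step_py : Prop := ∀ (algorithm_name : String) (params : List (String × Int)), Dom_format_algorithm_step_py algorithm_name params → Pre_format_algorithm_step_py algorithm_name params → Spec_format_algorithm_step_py algorithm_name params (format_algorithm_step_py algorithm_name params)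

-- ===== LEMMAS AND PROOFS =====

-- the two lists A's ports concatenate, as filters of params
def pvF (params : List (String × Int)) (k : String) : List String :=
  (params.filter (fun p => p.1 == k)).map (fun p => pvFmt p.1 p.2)
def pvR (params : List (String × Int)) : List String :=
  (params.filter (fun p => !(["window_size", "window_length", "polyorder", "deriv"] : List String).contains p.1)).map (fun p => pvFmt p.1 p.2)

theorem pv_filter_nil {k : String} {l : List (String × Int)} (h : k ∉ l.map Prod.fst) :
    l.filter (fun p => p.1 == k) = [] := by
  induction l with
  | nil => rfl
  | cons p t ih =>
    simp only [List.map_cons, List.mem_cons] at h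
    simp [Ne.symm (fun e => h (Or.inl e)), ih (fun m => h (Or.inr m))]

-- A's optional singleton for an ordered key equals the filter, given unique keys
theorem pv_opt_eq_F (params : List (String × Int)) (k : String)
    (hnd : (params.map Prod.fst).Nodup) :
    (match (PySem.Dict.mk params).get? k with
     | some v => [pvFmt k v]
     | none => ([] : List String)) = pvF params k := by
  induction params with
  | nil => simp [pvF, PySem.Dict.get?]
  | cons p t ih =>
    obtain ⟨k0, v0⟩ := p
    simp only [List.map_cons, List.nodup_cons] at hnd
    rw [PySem.Dict.get?_mk_cons]
    by_cases hk : k0 = k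
    · subst hk
      simp [pvF, pv_filter_nil hnd.1]
    · have : (k0 == k) = false := by simp [hk]
      simp only [this, Bool.false_eq_true, if_false]
      have := ih hnd.2
      simpa [pvF, List.filter_cons, hk] using this

-- A's second loop appends the filtered remainder
theorem pv_foldl_append_if {α : Type} (c : α → Bool) (f : α → String)
    (l : List α) (init : List String) :
    l.foldl (fun acc x => if c x then acc else acc ++ [f x]) init
      = init ++ (l.filter (fun x => !c x)).map f := by
  induction l generalizing init with
  | nil => simp
  | cons x t ih =>
    by_cases hx : c x <;> simp [List.foldl_cons, hx, ih]

-- B's bucket fold, fully characterised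
theorem pv_step_hit (b0 b1 b2 b3 b4 : List String) (k : String) (v : Int) :
    pvStep [b0, b1, b2, b3, b4] (k, v) =
      if k = "window_size" then [b0 ++ [pvFmt k v], b1, b2, b3, b4]
      else if k = "window_length" then [b0, b1 ++ [pvFmt k v], b2, b3, b4]
      else if k = "polyorder" then [b0, b1, b2 ++ [pvFmt k v], b3, b4]
      else if k = "deriv" then [b0, b1, b2, b3 ++ [pvFmt k v], b4]
      else [b0, b1, b2, b3, b4 ++ [pvFmt k v]] := by
  simp only [pvStep]
  by_cases h0 : k = "window_size"
  · subst h0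
    rw [show PySem.List.index? (["window_size", "window_length", "polyorder", "deriv"] : List String) "window_size" = some 0 from by decide]
    simp
  · by_cases h1 : k = "window_length"
    · subst h1
      rw [show PySem.List.index? (["window_size", "window_length", "polyorder", "deriv"] : List String) "window_length" = some 1 from by decide]
      simp
    · by_cases h2 : k = "polyorder"
      · subst h2
        rw [show PySem.List.index? (["window_size", "window_length", "polyorder", "deriv"] : List String) "polyorder" = some 2 from by decide]
        simp
      · by_cases h3 : k = "deriv"
        · subst h3
          rw [show PySem.List.index? (["window_size", "window_length", "polyorder", "deriv"] : List String) "deriv" = some 3 from by decide]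
          simp
        · have hnone : PySem.List.index? (["window_size", "window_length", "polyorder", "deriv"] : List String) k = none := by
            rw [PySem.List.index?_eq_none_iff]
            simp [h0, h1, h2, h3]
          rw [hnone]
          simp [h0, h1, h2, h3]

theorem pv_buckets (params : List (String × Int)) (b0 b1 b2 b3 b4 : List String) :
    params.foldl pvStep [b0, b1, b2, b3, b4]
    = [b0 ++ pvF params "window_size", b1 ++ pvF params "window_length",
       b2 ++ pvF params "polyorder", b3 ++ pvF params "deriv", b4 ++ pvR params] := by
  induction params generalizing b0 b1 b2 b3 b4 with
  | nil => simp [pvF, pvR]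
  | cons p t ih =>
    obtain ⟨k, v⟩ := p
    rw [List.foldl_cons, pv_step_hit]
    by_cases h0 : k = "window_size"
    · subst h0; rw [if_pos rfl, ih]; simp [pvF, pvR]
    · by_cases h1 : k = "window_length"
      · subst h1; rw [if_neg h0, if_pos rfl, ih]; simp [pvF, pvR, h0]
      · by_cases h2 : k = "polyorder"
        · subst h2; rw [if_neg h0, if_neg h1, if_pos rfl, ih]; simp [pvF, pvR, h0, h1]
        · by_cases h3 : k = "deriv"
          · subst h3; rw [if_neg h0, if_neg h1, if_neg h2, if_pos rfl, ih]
            simp [pvF, pvR, h0, h1, h2]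
          · rw [if_neg h0, if_neg h1, if_neg h2, if_neg h3, ih]
            simp [pvF, pvR, h0, h1, h2, h3]

-- the concatenated parts are nonempty whenever params is
theorem pv_parts_ne_nil (k : String) (v : Int) (t : List (String × Int)) :
    pvF ((k, v) :: t) "window_size" ++ pvF ((k, v) :: t) "window_length"
      ++ pvF ((k, v) :: t) "polyorder" ++ pvF ((k, v) :: t) "deriv" ++ pvR ((k, v) :: t) ≠ [] := by
  intro h
  simp only [List.append_eq_nil_iff] at h
  by_cases h0 : k = "window_size"
  · have := h.1.1.1.1; simp [pvF, h0] at this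
  · by_cases h1 : k = "window_length"
    · have := h.1.1.1.2; simp [pvF, h1] at this
    · by_cases h2 : k = "polyorder"
      · have := h.1.1.2; simp [pvF, h2] at this
      · by_cases h3 : k = "deriv"
        · have := h.1.2; simp [pvF, h3] at this
        · have := h.2
          simp [pvR, h0, h1, h2, h3] at this

-- ===== VERDICT (by name: the statement is the Claim_ definition above) =====
theorem format_algorithm_step_py_spec : Claim_equal_format_algorithm_step_py := by
  intro algorithm_name params _ hpre
  unfold Spec_format_algorithm_step_py format_algorithm_step_py format_algorithm_step_py_alt
  by_cases hp : params = []
  · simp [hp]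
  · simp only [hp, if_false]
    rw [pv_buckets]
    have hA1 : (["window_size", "window_length", "polyorder", "deriv"] : List String).foldl
        (fun acc key => match (PySem.Dict.mk params).get? key with
          | some v => acc ++ [pvFmt key v]
          | none => acc) []
        = pvF params "window_size" ++ pvF params "window_length"
          ++ pvF params "polyorder" ++ pvF params "deriv" := by
      simp only [List.foldl_cons, List.foldl_nil]
      rw [← pv_opt_eq_F params "window_size" hpre, ← pv_opt_eq_F params "window_length" hpre,
          ← pv_opt_eq_F params "polyorder" hpre, ← pv_opt_eq_F params "deriv" hpre]
      cases (PySem.Dict.mk params).get? "window_size" <;>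
        cases (PySem.Dict.mk params).get? "window_length" <;>
          cases (PySem.Dict.mk params).get? "polyorder" <;>
            cases (PySem.Dict.mk params).get? "deriv" <;> simp
    rw [hA1, pv_foldl_append_if]
    obtain ⟨⟨k, v⟩, t, rfl⟩ : ∃ p t, params = p :: t := by
      cases params with
      | nil => exact absurd rfl hp
      | cons p t => exact ⟨p, t, rfl⟩
    split_ifs with h
    · exact absurd (by simpa [pvR, List.append_assoc] using h) (pv_parts_ne_nil k v t)
    · simp [pvR, List.append_assoc]
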